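-- pv_equiv track=rewrite | github.com/eduardburlacu/ADS | set/pangram.py | count_succesors
-- ===== SOURCE A (Python) =====
-- def count_succesors(nums:list[int]):
--     freq = {}
--     count = 0
--     for num in nums:
--         if num not in freq:
--             freq[num] = 1
--         else:
--             freq[num] += 1
--     for num in nums:
--         nxt = num + 1
--         if nxt in freq:
--             count += min(freq[num], freq[num+1])
--     return count
-- ===== SOURCE B (Python) =====
-- def count_succesors(nums):
--     s = sorted(nums)
--     groups = []  # run-length groups (value, count) of s
--     for x in s:
--         if groups and groups[-1][0] == x:
--             groups[-1] = (x, groups[-1][1] + 1)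
--         else:
--             groups.append((x, 1))
--     total = 0
--     for (v, c), (w, d) in zip(groups, groups[1:]):
--         if w == v + 1:
--             total += c * min(c, d)
--     return total
-- ===== Notes on version B (the rewrite author's own statement) =====
-- stated objective: alternative
-- what changed: B sorts a copy of the list, run-length-encodes it into (value,count) groups, and sums count*min(count,next_count) over adjacent groups whose values differ by 1, instead of A's frequency dict plus a second per-occurrence pass.
import Mathlib
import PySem

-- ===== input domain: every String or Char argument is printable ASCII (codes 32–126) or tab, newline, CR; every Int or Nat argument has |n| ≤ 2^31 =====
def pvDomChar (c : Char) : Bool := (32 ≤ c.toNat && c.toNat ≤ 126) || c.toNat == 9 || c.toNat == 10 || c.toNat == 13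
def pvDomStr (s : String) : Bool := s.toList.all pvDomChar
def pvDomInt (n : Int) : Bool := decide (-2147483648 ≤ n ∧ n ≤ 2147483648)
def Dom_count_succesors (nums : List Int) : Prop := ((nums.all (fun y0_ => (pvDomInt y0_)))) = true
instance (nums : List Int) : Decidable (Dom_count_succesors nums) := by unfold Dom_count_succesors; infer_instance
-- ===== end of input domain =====

-- B replaces A's frequency dict and per-occurrence second pass by sort + run-length
-- groups + one scan over adjacent groups (objective: alternative decomposition).

-- ===== PORT A =====
def count_succesors (nums : List Int) : Int :=
  let freq := nums.foldl (fun d num =>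
    if d.contains num = false then d.insert num 1
    else d.insert num (d.getD num 0 + 1)) PySem.Dict.empty
  -- for num in nums: nxt = num + 1; if nxt in freq: count += min(freq[num], freq[nxt])
  nums.foldl (fun count num =>
    if freq.contains (num + 1) then
      count + min (freq.getD num 0) (freq.getD (num + 1) 0)
    else count) 0

-- ===== PORT B =====
def count_succesors_alt (nums : List Int) : Int :=
  let s := PySem.List.sorted nums (fun x => x) false
  -- for x in s: merge x into the last group (groups[-1]) or append a new one
  let groups := s.foldl (fun g x =>
    match g.getLast? with
    | some (v, c) => if v == x then g.dropLast ++ [(x, c + 1)] else g ++ [(x, 1)]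
    | none => [(x, 1)]) ([] : List (Int × Int))
  -- for (v,c),(w,d) in zip(groups, groups[1:]): if w == v+1: total += c*min(c,d)
  (groups.zip (PySem.List.slice groups (some 1) none)).foldl (fun total p =>
    if p.2.1 == p.1.1 + 1 then total + p.1.2 * min p.1.2 p.2.2 else total) 0

-- ===== PRECONDITION & SPEC =====
def Spec_count_succesors (nums : List Int) (out : Int) : Prop := out = count_succesors_alt nums
instance (nums : List Int) (out : Int) : Decidable (Spec_count_succesors nums out) := by unfold Spec_count_succesors; infer_instance

-- ===== CLAIM (what is proved, stated in full; the proofs are below) =====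
def Claim_equal_count_succesors : Prop := ∀ (nums : List Int), Dom_count_succesors nums → Spec_count_succesors nums (count_succesors nums)

-- ===== LEMMAS AND PROOFS =====

/-- Integer-valued occurrence count. -/
def cnt (l : List Int) (v : Int) : Int := (l.count v : Int)

/-- Per-occurrence summand, counts taken over the whole list `l`. -/
def term (l : List Int) (x : Int) : Int := min (cnt l x) (cnt l (x + 1))

/-- The common middle form: sum of `term l x` over the occurrences of `l`. -/
def msum (l : List Int) : Int := (l.map (term l)).sum

/-- Run-length encoding, front-first. -/
def rle : List Int → List (Int × Int)
  | [] => []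
  | x :: t =>
    match rle t with
    | (v, c) :: g => if v = x then (x, c + 1) :: g else (x, 1) :: (v, c) :: g
    | [] => [(x, 1)]

/-- Sum over adjacent group pairs. -/
def pairSum : List (Int × Int) → Int
  | (v, c) :: (w, d) :: g =>
      (if w = v + 1 then c * min c d else 0) + pairSum ((w, d) :: g)
  | _ => 0

-- ---------- A-side ----------

theorem freq_eq_counter (nums : List Int) :
    nums.foldl (fun d num =>
      if d.contains num = false then d.insert num 1
      else d.insert num (d.getD num 0 + 1)) PySem.Dict.empty
    = PySem.Dict.counter nums := by
  have h : (fun (d : PySem.Dict Int Int) (num : Int) =>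
      if d.contains num = false then d.insert num 1
      else d.insert num (d.getD num 0 + 1))
      = (fun d num => d.insert num (d.getD num 0 + 1)) := by
    funext d num
    by_cases hc : d.contains num = false
    · rw [if_pos hc, PySem.Dict.getD_of_not_contains (h := hc)]; norm_num
    · rw [if_neg hc]
  rw [h, PySem.Dict.foldl_insert_getD_add_one_eq_counter]

theorem a_loop (nums : List Int) (d : PySem.Dict Int Int)
    (hd : d = PySem.Dict.counter nums) :
    nums.foldl (fun count num =>
      if d.contains (num + 1) then
        count + min (d.getD num 0) (d.getD (num + 1) 0)
      else count) 0 = msum nums := by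
  subst hd
  have hbody : (fun (count : Int) (num : Int) =>
      if (PySem.Dict.counter nums).contains (num + 1) then
        count + min ((PySem.Dict.counter nums).getD num 0)
                    ((PySem.Dict.counter nums).getD (num + 1) 0)
      else count)
      = (fun count num => count +
          (if (PySem.Dict.counter nums).contains (num + 1) then
            min ((PySem.Dict.counter nums).getD num 0)
                ((PySem.Dict.counter nums).getD (num + 1) 0)
          else 0)) := by
    funext count num; split <;> simp
  rw [hbody, PySem.List.foldl_add]
  unfold msum
  have hmap : nums.map (fun num =>
      if (PySem.Dict.counter nums).contains (num + 1) then
        min ((PySem.Dict.counter nums).getD num 0)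
            ((PySem.Dict.counter nums).getD (num + 1) 0)
      else 0) = nums.map (term nums) := by
    apply List.map_congr_left
    intro x _
    by_cases hm : (x + 1) ∈ nums
    · simp [PySem.Dict.contains_counter, hm, term, cnt, PySem.Dict.getD_counter]
    · have h0 : nums.count (x + 1) = 0 := List.count_eq_zero.mpr hm
      simp [PySem.Dict.contains_counter, hm, term, cnt, h0]
  rw [hmap]; ring

theorem a_eq_msum (nums : List Int) : count_succesors nums = msum nums := by
  unfold count_succesors
  exact a_loop nums _ (freq_eq_counter nums)

-- ---------- B-side: fold = rle, zip-fold = pairSum ----------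

/-- One `rle` step: merge a pair onto the front of a group list. -/
def mergeFront (a : Int × Int) : List (Int × Int) → List (Int × Int)
  | (w, d) :: g => if w = a.1 then (a.1, d + a.2) :: g else a :: (w, d) :: g
  | [] => [a]

theorem rle_cons_eq_mergeFront (x : Int) (t : List Int) :
    rle (x :: t) = mergeFront (x, 1) (rle t) := by
  cases h : rle t with
  | nil => simp [rle, mergeFront, h]
  | cons p g =>
    obtain ⟨w, d⟩ := p
    by_cases hw : w = x <;> simp [rle, mergeFront, h, hw]

theorem mergeFront_head (a : Int × Int) (r : List (Int × Int)) :
    ∃ b g', mergeFront a r = (a.1, b) :: g' := by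
  cases r with
  | nil => exact ⟨a.2, [], by simp [mergeFront]⟩
  | cons p g =>
    obtain ⟨w, d⟩ := p
    by_cases hw : w = a.1
    · exact ⟨d + a.2, g, by simp [mergeFront, hw]⟩
    · exact ⟨a.2, (w, d) :: g, by simp [mergeFront, hw]⟩

theorem merge_merge_same (x c : Int) (r : List (Int × Int)) :
    mergeFront (x, c) (mergeFront (x, 1) r) = mergeFront (x, c + 1) r := by
  cases r with
  | nil => simp [mergeFront]; ring
  | cons p g =>
    obtain ⟨w, d⟩ := p
    by_cases hw : w = x
    · simp [mergeFront, hw]; ring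
    · simp [mergeFront, hw]; ring

theorem merge_merge_ne (v c x : Int) (hvx : v ≠ x) (r : List (Int × Int)) :
    mergeFront (v, c) (mergeFront (x, 1) r) = (v, c) :: mergeFront (x, 1) r := by
  obtain ⟨b, g', hb⟩ := mergeFront_head (x, 1) r
  rw [hb]
  simp [mergeFront, hvx.symm]

theorem foldl_end_append (s : List Int) : ∀ (p : List (Int × Int)) (v c : Int),
    s.foldl (fun g x =>
      match g.getLast? with
      | some (v, c) => if v == x then g.dropLast ++ [(x, c + 1)] else g ++ [(x, 1)]
      | none => [(x, 1)]) (p ++ [(v, c)])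
    = p ++ mergeFront (v, c) (rle s) := by
  induction s with
  | nil => intro p v c; simp [rle, mergeFront]
  | cons x t ih =>
    intro p v c
    rw [List.foldl_cons]
    have hlast : (p ++ [(v, c)]).getLast? = some (v, c) := by simp
    have hdrop : (p ++ [(v, c)]).dropLast = p := by simp
    rw [rle_cons_eq_mergeFront]
    simp only [hlast, hdrop]
    by_cases hv : v = x
    · rw [if_pos (by simp [hv]), ih p x (c + 1), hv, merge_merge_same]
    · rw [if_neg (by simp [hv]), ih (p ++ [(v, c)]) x 1, merge_merge_ne v c x hv]
      simp

theorem groups_eq_rle (s : List Int) :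
    s.foldl (fun g x =>
      match g.getLast? with
      | some (v, c) => if v == x then g.dropLast ++ [(x, c + 1)] else g ++ [(x, 1)]
      | none => [(x, 1)]) ([] : List (Int × Int))
    = rle s := by
  cases s with
  | nil => rfl
  | cons x t =>
    rw [List.foldl_cons]
    have h := foldl_end_append t [] x 1
    simp only [List.nil_append] at h
    simp only [List.getLast?_nil]
    rw [h, rle_cons_eq_mergeFront]

theorem zipfold_eq_pairSum (g : List (Int × Int)) (a : Int) :
    (g.zip (g.drop 1)).foldl (fun total p =>
      if p.2.1 == p.1.1 + 1 then total + p.1.2 * min p.1.2 p.2.2 else total) a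
    = a + pairSum g := by
  induction g generalizing a with
  | nil => simp [pairSum]
  | cons p g ih =>
    obtain ⟨v, c⟩ := p
    cases g with
    | nil => simp [pairSum]
    | cons q g' =>
      obtain ⟨w, d⟩ := q
      simp only [List.drop_succ_cons, List.drop_zero, List.zip_cons_cons,
        List.foldl_cons] at ih ⊢
      rw [ih]
      by_cases hw : w = v + 1
      · simp [pairSum, hw]; ring
      · simp [pairSum, hw]

-- ---------- run decomposition of a sorted list ----------

theorem rle_head (u : List Int) (x : Int) (t : List Int) (h : u = x :: t) :
    ∃ c g, rle u = (x, c) :: g := by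
  subst h
  unfold rle
  cases h : rle t with
  | nil => exact ⟨1, [], rfl⟩
  | cons p g =>
    obtain ⟨v, c⟩ := p
    by_cases hv : v = x
    · exact ⟨c + 1, g, by simp [hv]⟩
    · exact ⟨1, (v, c) :: g, by simp [hv]⟩

theorem rle_replicate_append (k : Nat) (hk : 1 ≤ k) (x : Int) (u : List Int)
    (hu : ∀ t, u ≠ x :: t) :
    rle (List.replicate k x ++ u) = (x, (k : Int)) :: rle u := by
  induction k with
  | zero => omega
  | succ n ih =>
    by_cases hn : 1 ≤ n
    · have hrec := ih hn
      rw [List.replicate_succ, List.cons_append]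
      simp only [rle, hrec]
      push_cast
      simp
    · have hn0 : n = 0 := by omega
      subst hn0
      simp only [List.replicate_succ, List.replicate_zero, List.cons_append,
        List.nil_append]
      cases hcu : u with
      | nil => simp [rle]
      | cons y t =>
        obtain ⟨c', g', hh⟩ := rle_head (y :: t) y t rfl
        have hyx : y ≠ x := fun he => hu t (by rw [hcu, he])
        have he : rle (x :: y :: t) = (match rle (y :: t) with
          | (v, c) :: g => if v = x then (x, c + 1) :: g else (x, 1) :: (v, c) :: g
          | [] => [(x, 1)]) := rfl
        rw [he, hh]
        simp [hyx]

/-- Decompose a sorted nonempty list into its first run and a strictly larger rest. -/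
theorem sorted_decomp (x : Int) (t : List Int) (hs : (x :: t).Pairwise (· ≤ ·)) :
    ∃ (k : Nat) (u : List Int), 1 ≤ k ∧ x :: t = List.replicate k x ++ u ∧
      u.Pairwise (· ≤ ·) ∧ (∀ y ∈ u, x < y) ∧
      (k : Int) = cnt (x :: t) x ∧ u.length < (x :: t).length := by
  classical
  set s := x :: t with hs_def
  set k := (s.takeWhile (fun y => y == x)).length with hk
  set u := s.dropWhile (fun y => y == x) with hu
  have htk : s.takeWhile (fun y => y == x) = List.replicate k x := by
    apply List.eq_replicate_of_mem
    intro y hy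
    simpa using List.mem_takeWhile_imp hy
  have hsplit : s = List.replicate k x ++ u := by
    rw [← htk, hu, List.takeWhile_append_dropWhile]
  have hk1 : 1 ≤ k := by
    rw [hk, hs_def]
    simp
  have husuf : u.Sublist s := by
    rw [hu]; exact List.dropWhile_sublist _
  have huSorted : u.Pairwise (· ≤ ·) := hs.sublist husuf
  -- head of u is not x
  have hhead : ∀ t', u ≠ x :: t' := by
    intro t' he
    have hdw := List.head?_dropWhile_not (fun y => y == x) s
    rw [← hu, he] at hdw
    simp at hdw
  -- every element of u is > x
  have hgt : ∀ y ∈ u, x < y := by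
    intro y hy
    have hyx : x ≤ y := by
      have hys : y ∈ s := husuf.mem hy
      rw [hs_def] at hys
      rcases List.mem_cons.mp hys with h | h
      · omega
      · exact List.rel_of_pairwise_cons hs h
    rcases lt_or_eq_of_le hyx with h | h
    · exact h
    · exfalso
      cases hcu : u with
      | nil => rw [hcu] at hy; simp at hy
      | cons w t' =>
        have hwx : x ≤ w := by
          have hws : w ∈ s := husuf.mem (by rw [hcu]; simp)
          rw [hs_def] at hws
          rcases List.mem_cons.mp hws with hh | hh
          · omega
          · exact List.rel_of_pairwise_cons hs hh
        rcases lt_or_eq_of_le hwx with hlt | heq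
        · -- all of u ≥ w > x, but y = x ∈ u
          rw [hcu] at hy huSorted
          rcases List.mem_cons.mp hy with hh | hh
          · omega
          · have := List.rel_of_pairwise_cons huSorted hh
            omega
        · exact hhead t' (by rw [hcu, ← heq])
  have hcx : (k : Int) = cnt s x := by
    have hcount : s.count x = k := by
      rw [hsplit, List.count_append, List.count_replicate]
      have h0 : u.count x = 0 := List.count_eq_zero.mpr (fun hx => lt_irrefl x (hgt x hx))
      simp [h0]
    simp [cnt, hcount]
  have hlen : u.length < s.length := by
    have : s.length = k + u.length := by rw [hsplit]; simp
    omega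
  exact ⟨k, u, hk1, hsplit, huSorted, hgt, hcx, hlen⟩

-- counts through the run decomposition
theorem cnt_run (k : Nat) (x v : Int) (u : List Int) (hvx : v ≠ x) :
    cnt (List.replicate k x ++ u) v = cnt u v := by
  simp [cnt, List.count_append, List.count_replicate, hvx.symm]

/-- Main lemma (fuel form): on a sorted list the adjacent-pair group sum is `msum`. -/
theorem pairSum_rle_eq_msum_aux (n : Nat) :
    ∀ s : List Int, s.length ≤ n → s.Pairwise (· ≤ ·) → pairSum (rle s) = msum s := by
  induction n with
  | zero =>
    intro s hlen _
    have : s = [] := List.eq_nil_of_length_eq_zero (by omega)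
    subst this
    simp [rle, pairSum, msum]
  | succ m ih =>
    intro s hlen hs
    cases s with
    | nil => simp [rle, pairSum, msum]
    | cons x t =>
      obtain ⟨k, u, hk1, hsplit, huS, hgt, hcx, hulen⟩ := sorted_decomp x t hs
      have hune : ∀ t', u ≠ x :: t' := by
        intro t' he
        have : x < x := hgt x (by rw [he]; simp)
        omega
      have hrle : rle (x :: t) = (x, (k : Int)) :: rle u := by
        rw [hsplit]; exact rle_replicate_append k hk1 x u hune
      have hihu : pairSum (rle u) = msum u := by
        have : u.length ≤ m := by simp at hlen hulen ⊢; omega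
        exact ih u this huS
      have hcnt_next : cnt (x :: t) (x + 1) = cnt u (x + 1) := by
        rw [hsplit]; exact cnt_run k x (x + 1) u (by omega)
      have hterm_x : term (x :: t) x = min (k : Int) (cnt u (x + 1)) := by
        rw [term, ← hcx, hcnt_next]
      have hterm_u : ∀ y ∈ u, term (x :: t) y = term u y := by
        intro y hy
        have hxy : x < y := hgt y hy
        rw [term, term, hsplit, cnt_run k x y u (by omega),
          cnt_run k x (y + 1) u (by omega)]
      have hmsum : msum (x :: t) = (k : Int) * min (k : Int) (cnt u (x + 1)) + msum u := by
        rw [msum]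
        set f := term (x :: t) with hf
        rw [hsplit, List.map_append, List.sum_append]
        have h2 : u.map f = u.map (term u) :=
          List.map_congr_left (by rw [hf]; exact hterm_u)
        rw [h2, List.map_replicate, List.sum_replicate, hterm_x, msum]
        simp
      rw [hrle, hmsum]
      have hknn : (0 : Int) ≤ (k : Int) := Int.natCast_nonneg k
      cases hcu : u with
      | nil =>
        simp [rle, pairSum, msum, cnt]
      | cons w t' =>
        obtain ⟨c, g, hh⟩ := rle_head u w t' hcu
        rw [← hcu, hh]
        show (if w = x + 1 then (k : Int) * min (k : Int) c else 0) + pairSum ((w, c) :: g) = _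
        rw [← hh, hihu]
        by_cases hw : w = x + 1
        · obtain ⟨k', u', hk1', hsplit', huS', hgt', hcx', _⟩ :=
            sorted_decomp w t' (by rw [← hcu]; exact huS)
          have hrle' : rle u = (w, (k' : Int)) :: rle u' := by
            rw [hcu, hsplit']
            exact rle_replicate_append k' hk1' w u' (by
              intro t'' he
              have : w < w := hgt' w (by rw [he]; simp)
              omega)
          have hc : c = (k' : Int) := by
            rw [hh] at hrle'
            injection hrle' with h1 _
            injection h1
          rw [if_pos hw, hc, hcx', ← hcu, ← hw]
        · have hnotin : (x + 1) ∉ u := by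
            intro hmem
            have hwle : w ≤ x + 1 := by
              rw [hcu] at hmem huS
              rcases List.mem_cons.mp hmem with hh' | hh'
              · omega
              · exact List.rel_of_pairwise_cons huS hh'
            have hxw : x < w := hgt w (by rw [hcu]; simp)
            omega
          have h0 : cnt u (x + 1) = 0 := by
            simp [cnt, List.count_eq_zero.mpr hnotin]
          rw [h0, if_neg hw]
          simp

theorem b_loop (nums s : List Int) (hperm : s.Perm nums)
    (hsort : s.Pairwise (· ≤ ·)) (groups : List (Int × Int))
    (hg : groups = s.foldl (fun g x =>
      match g.getLast? with
      | some (v, c) => if v == x then g.dropLast ++ [(x, c + 1)] else g ++ [(x, 1)]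
      | none => [(x, 1)]) ([] : List (Int × Int))) :
    (groups.zip (PySem.List.slice groups (some 1) none)).foldl (fun total p =>
      if p.2.1 == p.1.1 + 1 then total + p.1.2 * min p.1.2 p.2.2 else total) 0
    = msum nums := by
  subst hg
  rw [groups_eq_rle]
  rw [show PySem.List.slice (rle s) (some 1) none = (rle s).drop 1 by
    simpa using PySem.List.slice_from_natCast (rle s) 1]
  rw [zipfold_eq_pairSum, pairSum_rle_eq_msum_aux s.length s le_rfl hsort]
  have hcnt : ∀ v, cnt s v = cnt nums v := by
    intro v; simp [cnt, hperm.count_eq]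
  have hterm : term s = term nums := by
    funext y; rw [term, term, hcnt, hcnt]
  rw [msum, hterm, (hperm.map (term nums)).sum_eq, ← msum]
  ring

theorem b_eq_msum (nums : List Int) : count_succesors_alt nums = msum nums := by
  unfold count_succesors_alt
  refine b_loop nums (PySem.List.sorted nums (fun x => x) false)
    (PySem.List.sorted_perm nums (fun x => x) false) ?_ _ rfl
  have := PySem.List.sorted_pairwise (xs := nums) (key := fun x => x)
  simpa using this

-- ===== VERDICT (by name: the statement is the Claim_ definition above) =====
theorem count_succesors_spec : Claim_equal_count_succesors := by
  intro nums _
  show count_succesors nums = count_succesors_alt nums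
  rw [a_eq_msum, b_eq_msum]
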